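-- pv_equiv track=rewrite | github.com/yzh1990223/BloodLine-Analysis | backend/src/bloodline_api/parsers/sql_table_extractor.py | _strip_sql_line_comments
-- ===== SOURCE A (Python) =====
-- def _strip_sql_line_comments(sql: str) -> str:
--     """Remove `--` comments while preserving text inside quoted strings."""
--
--     result: list[str] = []
--     index = 0
--     in_single_quote = False
--     in_double_quote = False
--
--     while index < len(sql):
--         current = sql[index]
--         nxt = sql[index + 1] if index + 1 < len(sql) else ""
--
--         if current == "'" and not in_double_quote:
--             if in_single_quote and nxt == "'":
--                 result.append(current)
--                 result.append(nxt)
--                 index += 2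
--                 continue
--             in_single_quote = not in_single_quote
--             result.append(current)
--             index += 1
--             continue
--
--         if current == '"' and not in_single_quote:
--             in_double_quote = not in_double_quote
--             result.append(current)
--             index += 1
--             continue
--
--         if not in_single_quote and not in_double_quote and current == "-" and nxt == "-":
--             while index < len(sql) and sql[index] != "\n":
--                 index += 1
--             continue
--
--         result.append(current)
--         index += 1
--
--     return "".join(result)
-- ===== SOURCE B (Python) =====
-- def _strip_sql_line_comments(sql: str) -> str:
--     """Remove `--` comments while preserving text inside quoted strings.
--
--     Token-consuming scanner: whole quoted-string tokens are consumed by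
--     dedicated inner loops instead of maintaining quote-state flags.
--     """
--     out = []
--     i = 0
--     n = len(sql)
--     while i < n:
--         c = sql[i]
--         if c == "'":
--             # consume a single-quoted string token ('' is an escaped quote)
--             out.append(c)
--             i += 1
--             while i < n:
--                 if sql[i] == "'" and i + 1 < n and sql[i + 1] == "'":
--                     out.append("''")
--                     i += 2
--                 elif sql[i] == "'":
--                     out.append("'")
--                     i += 1
--                     break
--                 else:
--                     out.append(sql[i])
--                     i += 1
--         elif c == '"':
--             # consume a double-quoted string token
--             out.append(c)
--             i += 1
--             while i < n:
--                 d = sql[i]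
--                 out.append(d)
--                 i += 1
--                 if d == '"':
--                     break
--         elif c == "-" and i + 1 < n and sql[i + 1] == "-":
--             # line comment: skip to (but keep) the newline
--             while i < n and sql[i] != "\n":
--                 i += 1
--         else:
--             out.append(c)
--             i += 1
--     return "".join(out)
-- ===== Notes on version B (the rewrite author's own statement) =====
-- stated objective: idiomatic
-- what changed: Replaced A's char-by-char state machine with two boolean quote flags by a tokenizer that consumes whole quoted-string tokens (with '' escape handling) and comment runs in dedicated inner scans, so no quote-state flags are carried across iterations.
import Mathlib
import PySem

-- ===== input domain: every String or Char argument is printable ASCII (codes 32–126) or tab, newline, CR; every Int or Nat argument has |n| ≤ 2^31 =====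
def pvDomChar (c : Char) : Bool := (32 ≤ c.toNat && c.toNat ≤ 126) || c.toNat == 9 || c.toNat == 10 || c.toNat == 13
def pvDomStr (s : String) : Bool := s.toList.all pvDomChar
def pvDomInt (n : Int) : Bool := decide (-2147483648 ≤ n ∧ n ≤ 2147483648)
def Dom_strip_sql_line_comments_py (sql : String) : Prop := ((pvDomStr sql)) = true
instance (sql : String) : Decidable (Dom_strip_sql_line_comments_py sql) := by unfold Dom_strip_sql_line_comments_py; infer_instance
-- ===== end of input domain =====

-- B replaces A's char-by-char quote-flag state machine by a tokenizer that
-- consumes whole quoted-string tokens with dedicated consumers (idiomatic; same cost).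

-- ===== PORT A =====
-- A's while-loop over the index, with the two quote flags as loop state.
def stripA : List Char → Bool → Bool → List Char
  | [], _, _ => []
  | c :: rest, insq, indq =>
    if c == '\'' && !indq then
      if insq && rest.head? == some '\'' then
        c :: '\'' :: stripA rest.tail insq indq
      else
        c :: stripA rest (!insq) indq
    else if c == '"' && !insq then
      c :: stripA rest insq (!indq)
    else if (!insq && !indq) && (c == '-' && rest.head? == some '-') then
      stripA (rest.dropWhile (· ≠ '\n')) insq indq
    else
      c :: stripA rest insq indq
termination_by l _ _ => l.length
decreasing_by all_goals
  (simp only [List.length_cons, List.length_tail]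
   first
   | (have := List.length_dropWhile_le (p := (· ≠ '\n')) (l := rest); omega))

def strip_sql_line_comments_py (sql : String) : String :=
  String.ofList (stripA sql.toList false false)

-- ===== PORT B =====
-- consume the body of a single-quoted string after the opening quote
-- ('' is an escaped quote; the closing quote is optional at EOF)
def consumeSQ : List Char → List Char × List Char
  | [] => ([], [])
  | '\'' :: '\'' :: rest => ('\'' :: '\'' :: (consumeSQ rest).1, (consumeSQ rest).2)
  | '\'' :: rest => (['\''], rest)
  | c :: rest => (c :: (consumeSQ rest).1, (consumeSQ rest).2)

-- consume the body of a double-quoted string after the opening quote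
def consumeDQ : List Char → List Char × List Char
  | [] => ([], [])
  | '"' :: rest => (['"'], rest)
  | c :: rest => (c :: (consumeDQ rest).1, (consumeDQ rest).2)

theorem consumeSQ_snd_le (l : List Char) : (consumeSQ l).2.length ≤ l.length := by
  fun_induction consumeSQ l <;> (simp_all; try omega)

theorem consumeDQ_snd_le (l : List Char) : (consumeDQ l).2.length ≤ l.length := by
  fun_induction consumeDQ l <;> (simp_all; try omega)

def stripB : List Char → List Char
  | [] => []
  | '\'' :: rest => '\'' :: ((consumeSQ rest).1 ++ stripB (consumeSQ rest).2)
  | '"' :: rest => '"' :: ((consumeDQ rest).1 ++ stripB (consumeDQ rest).2)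
  | '-' :: '-' :: rest => stripB (rest.dropWhile (· ≠ '\n'))
  | c :: rest => c :: stripB rest
termination_by l => l.length
decreasing_by all_goals
  (simp only [List.length_cons]
   first
   | (have := consumeSQ_snd_le rest; omega)
   | (have := consumeDQ_snd_le rest; omega)
   | (have := List.length_dropWhile_le (p := (· ≠ '\n')) (l := rest); omega))

def strip_sql_line_comments_py_alt (sql : String) : String :=
  String.ofList (stripB sql.toList)

-- ===== PRECONDITION & SPEC =====
def Spec_strip_sql_line_comments_py (sql : String) (out : String) : Prop := out = strip_sql_line_comments_py_alt sql
instance (sql : String) (out : String) : Decidable (Spec_strip_sql_line_comments_py sql out) := by unfold Spec_strip_sql_line_comments_py; infer_instance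

-- ===== CLAIM (what is proved, stated in full; the proofs are below) =====
def Claim_equal_strip_sql_line_comments_py : Prop := ∀ (sql : String), Dom_strip_sql_line_comments_py sql → Spec_strip_sql_line_comments_py sql (strip_sql_line_comments_py sql)

-- ===== LEMMAS AND PROOFS =====

-- A's loop in the single-quote state = the single-quote consumer, then the base state
theorem stripA_sq_aux : ∀ (n : Nat) (l : List Char), l.length ≤ n →
    stripA l true false = (consumeSQ l).1 ++ stripA (consumeSQ l).2 false false := by
  intro n
  induction n with
  | zero =>
    intro l hl
    have : l = [] := List.eq_nil_of_length_eq_zero (Nat.le_zero.mp hl)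
    subst this; simp [stripA, consumeSQ]
  | succ n ih =>
    intro l hl
    match l with
    | [] => simp [stripA, consumeSQ]
    | c :: rest =>
      by_cases hc : c = '\''
      · subst hc
        match rest with
        | [] => simp [stripA, consumeSQ]
        | d :: r =>
          by_cases hd : d = '\''
          · subst hd
            simp only [List.length_cons] at hl
            rw [show stripA ('\'' :: '\'' :: r) true false
                  = '\'' :: '\'' :: stripA r true false by simp [stripA]]
            rw [ih r (by omega)]
            simp [consumeSQ]
          · simp [stripA, consumeSQ, hd]
      · simp only [List.length_cons] at hl
        rw [show stripA (c :: rest) true false = c :: stripA rest true false by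
              simp [stripA, hc]]
        rw [ih rest (by omega)]
        simp [consumeSQ, hc]

theorem stripA_sq (l : List Char) :
    stripA l true false = (consumeSQ l).1 ++ stripA (consumeSQ l).2 false false :=
  stripA_sq_aux l.length l le_rfl

-- A's loop in the double-quote state = the double-quote consumer, then the base state
theorem stripA_dq_aux : ∀ (n : Nat) (l : List Char), l.length ≤ n →
    stripA l false true = (consumeDQ l).1 ++ stripA (consumeDQ l).2 false false := by
  intro n
  induction n with
  | zero =>
    intro l hl
    have : l = [] := List.eq_nil_of_length_eq_zero (Nat.le_zero.mp hl)
    subst this; simp [stripA, consumeDQ]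
  | succ n ih =>
    intro l hl
    match l with
    | [] => simp [stripA, consumeDQ]
    | c :: rest =>
      by_cases hc : c = '"'
      · subst hc; simp [stripA, consumeDQ]
      · simp only [List.length_cons] at hl
        rw [show stripA (c :: rest) false true = c :: stripA rest false true by
              simp [stripA, hc]]
        rw [ih rest (by omega)]
        simp [consumeDQ]

theorem stripA_dq (l : List Char) :
    stripA l false true = (consumeDQ l).1 ++ stripA (consumeDQ l).2 false false :=
  stripA_dq_aux l.length l le_rfl

theorem stripA_eq_stripB_aux : ∀ (n : Nat) (l : List Char), l.length ≤ n →
    stripA l false false = stripB l := by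
  intro n
  induction n with
  | zero =>
    intro l hl
    have : l = [] := List.eq_nil_of_length_eq_zero (Nat.le_zero.mp hl)
    subst this; simp [stripA, stripB]
  | succ n ih =>
    intro l hl
    match l with
    | [] => simp [stripA, stripB]
    | c :: rest =>
      simp only [List.length_cons] at hl
      by_cases hc : c = '\''
      · subst hc
        rw [show stripA ('\'' :: rest) false false = '\'' :: stripA rest true false by
              simp [stripA]]
        rw [stripA_sq rest]
        rw [ih (consumeSQ rest).2 (by have := consumeSQ_snd_le rest; omega)]
        simp [stripB]
      · by_cases hq : c = '"'
        · subst hq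
          rw [show stripA ('"' :: rest) false false = '"' :: stripA rest false true by
                simp [stripA]]
          rw [stripA_dq rest]
          rw [ih (consumeDQ rest).2 (by have := consumeDQ_snd_le rest; omega)]
          simp [stripB]
        · by_cases hm : c = '-' ∧ rest.head? = some '-'
          · obtain ⟨hc1, hc2⟩ := hm
            subst hc1
            cases rest with
            | nil => simp at hc2
            | cons d r =>
              have hd : d = '-' := by simpa using hc2
              subst hd
              have h1 : stripA ('-' :: '-' :: r) false false
                  = stripA (('-' :: r).dropWhile (· ≠ '\n')) false false := by
                simp [stripA]
              have h2 : ('-' :: r).dropWhile (· ≠ '\n') = r.dropWhile (· ≠ '\n') := by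
                simp [List.dropWhile]
              rw [h1, h2]
              rw [ih (r.dropWhile (· ≠ '\n'))
                    (by have := List.length_dropWhile_le (p := (· ≠ '\n')) (l := r)
                        simp only [List.length_cons] at hl; omega)]
              simp [stripB]
          · have hstep : stripA (c :: rest) false false = c :: stripA rest false false := by
              simp [stripA, hc, hq]
              intro h1 h2
              exact absurd ⟨h1, by simpa using h2⟩ hm
            rw [hstep, ih rest (by omega)]
            -- stripB on a non-token character
            match rest with
            | [] => simp [stripB]
            | d :: r =>
              by_cases hd : c = '-'
              · subst hd
                have hdr : d ≠ '-' := by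
                  intro h; exact hm ⟨rfl, by simp [h]⟩
                simp [stripB, hdr]
              · simp [stripB, hd]

theorem stripA_eq_stripB (l : List Char) : stripA l false false = stripB l :=
  stripA_eq_stripB_aux l.length l le_rfl

-- ===== VERDICT (by name: the statement is the Claim_ definition above) =====
theorem strip_sql_line_comments_py_spec : Claim_equal_strip_sql_line_comments_py := by
  intro sql _
  unfold Spec_strip_sql_line_comments_py strip_sql_line_comments_py strip_sql_line_comments_py_alt
  rw [stripA_eq_stripB]
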